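-- pv_equiv track=rewrite | github.com/SealsJ/DataStructures-Algos | DSA Code/sliding_window.py | max_sum_dynamic_window
-- ===== SOURCE A (Python) =====
-- def max_sum_dynamic_window(arr, max_window_size):
--     n = len(arr)
--
--     # Check for invalid input
--     if max_window_size <= 0:
--         raise ValueError("Invalid maximum window size!")
--
--     # Initialize variables to keep track of the window and max sum
--     window_start = 0
--     max_sum = arr[0]  # Initialize max_sum with the first element of the array
--     current_sum = 0
--
--     for window_end in range(n):
--         # Expand the window by adding the element at the right end
--         current_sum += arr[window_end]
--
--         # Shrink the window if the size exceeds the maximum allowed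
--         while window_end - window_start >= max_window_size:
--             current_sum -= arr[window_start]
--             window_start += 1
--
--         # Update the max_sum if necessary
--         max_sum = max(max_sum, current_sum)
--
--     return max_sum
-- ===== SOURCE B (Python) =====
-- def max_sum_dynamic_window(arr, max_window_size):
--     if max_window_size <= 0:
--         raise ValueError("Invalid maximum window size!")
--     n = len(arr)
--     best = arr[0]
--     pre = [0]
--     for x in arr:
--         pre.append(pre[-1] + x)
--     for end in range(n):
--         start = max(0, end - max_window_size + 1)
--         best = max(best, pre[end + 1] - pre[start])
--     return best
-- ===== Notes on version B (the rewrite author's own statement) =====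
-- stated objective: alternative
-- what changed: Replaces the incremental sliding-window (add right end, while-loop shrinking the left end, running current_sum) with a precomputed prefix-sum table and a direct window formula pre[end+1]-pre[max(0,end-k+1)] per position.
import Mathlib
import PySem

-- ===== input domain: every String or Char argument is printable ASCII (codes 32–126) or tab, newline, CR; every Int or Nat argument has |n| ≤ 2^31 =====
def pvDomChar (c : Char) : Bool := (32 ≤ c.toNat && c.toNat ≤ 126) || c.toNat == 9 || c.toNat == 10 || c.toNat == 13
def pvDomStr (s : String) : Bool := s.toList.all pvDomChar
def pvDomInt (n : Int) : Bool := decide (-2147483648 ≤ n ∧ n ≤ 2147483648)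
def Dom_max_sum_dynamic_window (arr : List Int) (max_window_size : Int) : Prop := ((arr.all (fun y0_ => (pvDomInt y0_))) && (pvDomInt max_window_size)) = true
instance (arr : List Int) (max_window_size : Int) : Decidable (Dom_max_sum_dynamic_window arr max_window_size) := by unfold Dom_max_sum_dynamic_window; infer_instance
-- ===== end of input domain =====

-- B replaces A's incremental sliding window by a prefix-sum table with a direct
-- per-position window formula (alternative decomposition, same O(n) cost).

-- ===== PORT A =====
-- the inner `while window_end - window_start >= max_window_size` loop
def shrinkA (arr : List Int) (k wend start cur : Int) : Int × Int :=
  if _h : k ≤ wend - start then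
    shrinkA arr k wend (start + 1) (cur - PySem.List.pyGetD arr start 0)
  else (start, cur)
termination_by (wend - start - k + 1).toNat
decreasing_by omega

-- one iteration of A's `for window_end in range(n)` loop; state = (window_start, current_sum, max_sum)
def stepA (arr : List Int) (k : Int) (st : Int × Int × Int) (wend : Int) : Int × Int × Int :=
  let cur := st.2.1 + PySem.List.pyGetD arr wend 0
  let p := shrinkA arr k wend st.1 cur
  (p.1, p.2, max st.2.2 p.2)

def max_sum_dynamic_window (arr : List Int) (max_window_size : Int) : Int :=
  -- arr[0] (IndexError on [], excluded by Pre_) ported with pyGetD; k ≤ 0 (ValueError) excluded by Pre_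
  ((PySem.List.pyRange 0 (arr.length : Int) 1).foldl (stepA arr max_window_size)
      (0, 0, PySem.List.pyGetD arr 0 0)).2.2

-- ===== PORT B =====
-- `pre = [0]; for x in arr: pre.append(pre[-1] + x)`
def buildPre (arr : List Int) : List Int :=
  arr.foldl (fun pre x => pre ++ [PySem.List.pyGetD pre (-1) 0 + x]) [0]

-- one iteration of B's `for end in range(n)` loop
def stepB (pre : List Int) (k : Int) (best e : Int) : Int :=
  max best (PySem.List.pyGetD pre (e + 1) 0 - PySem.List.pyGetD pre (max 0 (e - k + 1)) 0)

def max_sum_dynamic_window_alt (arr : List Int) (max_window_size : Int) : Int :=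
  (PySem.List.pyRange 0 (arr.length : Int) 1).foldl
    (stepB (buildPre arr) max_window_size) (PySem.List.pyGetD arr 0 0)

-- ===== PRECONDITION & SPEC =====
-- Pre_ excludes exactly the inputs where A raises: max_window_size ≤ 0 (ValueError) and arr = [] (IndexError on arr[0]).
def Pre_max_sum_dynamic_window (arr : List Int) (max_window_size : Int) : Prop :=
  1 ≤ max_window_size ∧ arr ≠ []
instance (arr : List Int) (max_window_size : Int) : Decidable (Pre_max_sum_dynamic_window arr max_window_size) := by unfold Pre_max_sum_dynamic_window; infer_instance

def pvWitness_max_sum_dynamic_window : List Int × Int := ([1, -2, 3], 2)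

def Spec_max_sum_dynamic_window (arr : List Int) (max_window_size : Int) (out : Int) : Prop := out = max_sum_dynamic_window_alt arr max_window_size
instance (arr : List Int) (max_window_size : Int) (out : Int) : Decidable (Spec_max_sum_dynamic_window arr max_window_size out) := by unfold Spec_max_sum_dynamic_window; infer_instance

-- ===== CLAIM (what is proved, stated in full; the proofs are below) =====
def Claim_equal_max_sum_dynamic_window : Prop := ∀ (arr : List Int) (max_window_size : Int), Dom_max_sum_dynamic_window arr max_window_size → Pre_max_sum_dynamic_window arr max_window_size → Spec_max_sum_dynamic_window arr max_window_size (max_sum_dynamic_window arr max_window_size)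

-- ===== LEMMAS AND PROOFS =====

-- prefix sum of the first m elements
def pvS (arr : List Int) (m : Nat) : Int := (arr.take m).sum

lemma pvS_succ (arr : List Int) (m : Nat) (h : m < arr.length) :
    pvS arr (m + 1) = pvS arr m + arr[m] := List.sum_take_succ arr m h

-- the running sums appended by B's prefix loop
def pvScan : List Int → Int → List Int
  | [], _ => []
  | x :: xs, s => (s + x) :: pvScan xs (s + x)

lemma pvScan_eq_map (l : List Int) : ∀ s : Int,
    pvScan l s = (List.range l.length).map (fun m => s + (l.take (m + 1)).sum) := by
  induction l with
  | nil => intro s; simp [pvScan]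
  | cons x xs ih =>
    intro s
    simp only [pvScan, List.length_cons, List.range_succ_eq_map, List.map_cons, List.map_map,
      List.cons.injEq]
    refine ⟨by simp, ?_⟩
    rw [ih (s + x)]
    apply List.map_congr_left
    intro m _
    simp [List.take_succ_cons, add_assoc]

lemma buildPre_go (l : List Int) : ∀ (p : List Int) (s : Int), p.getLast? = some s →
    l.foldl (fun pre x => pre ++ [PySem.List.pyGetD pre (-1) 0 + x]) p = p ++ pvScan l s := by
  induction l with
  | nil => intro p s _; simp [pvScan]
  | cons x xs ih =>
    intro p s hs
    have hp : p ≠ [] := by intro h; simp [h] at hs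
    have hlast : PySem.List.pyGetD p (-1) 0 = s := by
      rw [PySem.List.pyGetD_neg_one p 0 hp]
      have h2 := List.getLast?_eq_some_getLast hp
      rw [h2] at hs
      exact Option.some.inj hs
    simp only [List.foldl_cons, hlast]
    rw [ih (p ++ [s + x]) (s + x) (by simp)]
    simp [pvScan, List.append_assoc]

lemma buildPre_eq (arr : List Int) :
    buildPre arr = (List.range (arr.length + 1)).map (pvS arr) := by
  rw [buildPre, buildPre_go arr [0] 0 (by simp)]
  rw [pvScan_eq_map]
  simp only [List.range_succ_eq_map, List.map_cons, List.map_map, List.singleton_append,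
    List.cons.injEq]
  refine ⟨by simp [pvS], ?_⟩
  apply List.map_congr_left
  intro m _
  simp [pvS]

lemma pre_get (arr : List Int) (i : Int) (h0 : 0 ≤ i) (h : i ≤ (arr.length : Int)) :
    PySem.List.pyGetD (buildPre arr) i 0 = pvS arr i.toNat := by
  rw [buildPre_eq]
  rw [PySem.List.pyGetD_eq_getElem _ 0 h0 (by simp; omega)]
  simp

lemma shrink_stop (arr : List Int) (k wend start cur : Int) (h : wend - start < k) :
    shrinkA arr k wend start cur = (start, cur) := by
  rw [shrinkA]; rw [dif_neg (by omega)]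

lemma shrink_once (arr : List Int) (k wend start cur : Int)
    (h1 : k ≤ wend - start) (h2 : wend - (start + 1) < k) :
    shrinkA arr k wend start cur = (start + 1, cur - PySem.List.pyGetD arr start 0) := by
  rw [shrinkA]; rw [dif_pos h1]; exact shrink_stop _ _ _ _ _ h2

-- the main invariant: after m iterations A's state is
-- (max 0 (m-k), S m - S (max 0 (m-k)), B's running best after m iterations)
lemma main_inv (arr : List Int) (k : Int) (hk : 1 ≤ k) :
    ∀ m : Nat, m ≤ arr.length →
    (PySem.List.pyRange 0 (m : Int) 1).foldl (stepA arr k) (0, 0, PySem.List.pyGetD arr 0 0) =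
      (max 0 ((m : Int) - k),
       pvS arr m - pvS arr (max 0 ((m : Int) - k)).toNat,
       (PySem.List.pyRange 0 (m : Int) 1).foldl (stepB (buildPre arr) k)
         (PySem.List.pyGetD arr 0 0)) := by
  intro m
  induction m with
  | zero =>
    intro _
    simp only [Nat.cast_zero]
    rw [PySem.List.pyRange_one_eq_nil (le_refl (0:Int))]
    have h1 : max 0 ((0 : Int) - k) = 0 := by omega
    rw [List.foldl_nil, List.foldl_nil, h1]
    simp [pvS]
  | succ m ih =>
    intro hm
    have hm' : m < arr.length := by omega
    have hsplit : PySem.List.pyRange 0 ((m + 1 : Nat) : Int) 1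
        = PySem.List.pyRange 0 (m : Int) 1 ++ [(m : Int)] := by
      have h1 : ((m + 1 : Nat) : Int) = (m : Int) + 1 := by push_cast; ring
      rw [h1, PySem.List.pyRange_one_succ_right (by omega)]
    rw [hsplit, List.foldl_append, List.foldl_append, ih (by omega)]
    simp only [List.foldl_cons, List.foldl_nil]
    have harr : PySem.List.pyGetD arr (m : Int) 0 = arr[m] := by
      rw [PySem.List.pyGetD_eq_getElem arr 0 (by omega) (by omega)]
      simp
    have hB1 : PySem.List.pyGetD (buildPre arr) ((m : Int) + 1) 0 = pvS arr (m + 1) := by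
      rw [pre_get arr _ (by omega) (by omega)]
      have ht : ((m : Int) + 1).toNat = m + 1 := by omega
      rw [ht]
    have hB2 : PySem.List.pyGetD (buildPre arr) (max 0 ((m : Int) - k + 1)) 0
        = pvS arr (max 0 ((m : Int) - k + 1)).toNat :=
      pre_get arr _ (le_max_left _ _) (by omega)
    simp only [stepA, stepB, hB1, hB2, harr]
    by_cases hc : (m : Int) < k
    · -- window not yet full: the while loop does not run
      have hmax0 : max 0 ((m : Int) - k) = 0 := by omega
      rw [hmax0, shrink_stop arr k _ _ _ (by omega)]
      have e2 : (max 0 (((m + 1 : Nat) : Int) - k)).toNat = 0 := by omega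
      have e3 : (max 0 ((m : Int) - k + 1)).toNat = 0 := by omega
      have e4 : max 0 (((m + 1 : Nat) : Int) - k) = 0 := by omega
      rw [e2, e3, e4, Int.toNat_zero]
      have hz : pvS arr 0 = 0 := by simp [pvS]
      rw [hz, pvS_succ arr m hm']
      dsimp only
      refine Prod.ext rfl (Prod.ext (by simp) (by simp))
    · -- window full: the while loop runs exactly once
      have hmax : max 0 ((m : Int) - k) = (m : Int) - k := by omega
      rw [hmax, shrink_once arr k _ _ _ (by omega) (by omega)]
      have hidx : PySem.List.pyGetD arr ((m : Int) - k) 0 = arr[((m : Int) - k).toNat] := by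
        rw [PySem.List.pyGetD_eq_getElem arr 0 (by omega) (by omega)]
      have e1 : ((m : Int) - k).toNat < arr.length := by omega
      have hS : pvS arr (((m : Int) - k).toNat + 1)
          = pvS arr ((m : Int) - k).toNat + arr[((m : Int) - k).toNat] :=
        List.sum_take_succ arr _ e1
      have e2 : (max 0 (((m + 1 : Nat) : Int) - k)).toNat = ((m : Int) - k).toNat + 1 := by omega
      have e3 : (max 0 ((m : Int) - k + 1)).toNat = ((m : Int) - k).toNat + 1 := by omega
      have e4 : max 0 (((m + 1 : Nat) : Int) - k) = (m : Int) - k + 1 := by omega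
      rw [hidx, e2, e3, e4, hS, pvS_succ arr m hm']
      dsimp only
      refine Prod.ext rfl (Prod.ext (by ring) ?_)
      congr 1
      ring_nf

-- ===== VERDICT (by name: the statement is the Claim_ definition above) =====
theorem max_sum_dynamic_window_spec : Claim_equal_max_sum_dynamic_window := by
  unfold Claim_equal_max_sum_dynamic_window
  intro arr k _ hpre
  unfold Spec_max_sum_dynamic_window max_sum_dynamic_window max_sum_dynamic_window_alt
  rw [main_inv arr k hpre.1 arr.length le_rfl]
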